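-- pv_equiv track=rewrite | github.com/MMuellenmeister/physics718 | exercise01/exercise01_homework.py | odd_fibonacci_numbers
-- ===== SOURCE A (Python) =====
-- def odd_fibonacci_numbers(n_numbers):
--     """
--     Return a list of the first N odd fibonacci numbers
--     """
--     if n_numbers == 1: return [1]
--     fib_list= [1,1]
--     odd_fib_list = [1,1]
--     while len(odd_fib_list)<n_numbers:
--         fib_list.append(fib_list[-1]+fib_list[-2])
--         if fib_list[-1]%2==1:
--             odd_fib_list.append(fib_list[-1])
--     return odd_fib_list
-- ===== SOURCE B (Python) =====
-- def odd_fibonacci_numbers(n_numbers):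
--     """
--     Return a list of the first N odd fibonacci numbers
--     """
--     if n_numbers == 1:
--         return [1]
--     result = [1, 1]
--     a, b = 1, 1
--     # Every third Fibonacci number is even, so odd Fibonacci numbers come in
--     # consecutive pairs: advance three steps at a time, skipping the even term.
--     while len(result) < n_numbers:
--         a, b = a + 2 * b, 2 * a + 3 * b
--         result.append(a)
--         if len(result) < n_numbers:
--             result.append(b)
--     return result
-- ===== Notes on version B (the rewrite author's own statement) =====
-- stated objective: alternative
-- what changed: B drops A's generate-every-Fibonacci-and-filter-by-parity loop and instead uses the period-3 parity pattern of Fibonacci numbers: it advances three Fibonacci steps at a time ((a,b) -> (a+2b, 2a+3b)), emitting the two guaranteed-odd values of each triple directly, with no parity test and no full Fibonacci list.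
import Mathlib
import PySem

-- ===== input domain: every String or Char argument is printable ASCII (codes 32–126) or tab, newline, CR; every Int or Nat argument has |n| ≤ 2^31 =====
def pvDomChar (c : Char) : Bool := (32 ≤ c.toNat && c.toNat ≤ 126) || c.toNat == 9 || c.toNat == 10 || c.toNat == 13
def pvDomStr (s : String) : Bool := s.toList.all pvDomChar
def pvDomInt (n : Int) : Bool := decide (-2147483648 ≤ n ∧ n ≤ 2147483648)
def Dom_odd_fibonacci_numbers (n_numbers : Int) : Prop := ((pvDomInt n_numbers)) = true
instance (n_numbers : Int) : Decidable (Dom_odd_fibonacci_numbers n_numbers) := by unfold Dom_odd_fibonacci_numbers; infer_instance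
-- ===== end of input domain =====

-- B replaces A's scan-and-filter loop by the period-3 structure of even Fibonacci
-- numbers, emitting the odd ones in consecutive pairs (objective: alternative).

-- ===== PORT A =====
-- A's while-loop; fuel only makes the recursion total (3 * n.toNat iterations
-- always suffice, proved below); the loop body is a step-for-step transliteration.
-- fib_list[-1] / fib_list[-2] via PySem.List.pyGet?; the list always has ≥ 2
-- elements, so the `.getD 0` default is never taken (exact).
def oddFibLoopA (fuel : Nat) (n : Int) (fib : List Int) (odd : List Int) : List Int :=
  match fuel with
  | 0 => odd
  | fuel + 1 =>
    if (odd.length : Int) < n then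
      let x := ((PySem.List.pyGet? fib (-1)).getD 0) + ((PySem.List.pyGet? fib (-2)).getD 0)
      let fib' := fib ++ [x]
      let odd' := if PySem.Int.mod x 2 = 1 then odd ++ [x] else odd
      oddFibLoopA fuel n fib' odd'
    else odd

def odd_fibonacci_numbers (n_numbers : Int) : List Int :=
  if n_numbers = 1 then [1]
  else oddFibLoopA (3 * n_numbers.toNat) n_numbers [1, 1] [1, 1]

-- ===== PORT B =====
-- B's while-loop; fuel n.toNat suffices (each iteration appends ≥ 1 element).
def oddFibLoopB (fuel : Nat) (n : Int) (a b : Int) (res : List Int) : List Int :=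
  match fuel with
  | 0 => res
  | fuel + 1 =>
    if (res.length : Int) < n then
      let a' := a + 2 * b
      let b' := 2 * a + 3 * b
      let res' := res ++ [a']
      let res'' := if (res'.length : Int) < n then res' ++ [b'] else res'
      oddFibLoopB fuel n a' b' res''
    else res

def odd_fibonacci_numbers_alt (n_numbers : Int) : List Int :=
  if n_numbers = 1 then [1]
  else oddFibLoopB n_numbers.toNat n_numbers 1 1 [1, 1]

-- ===== PRECONDITION & SPEC =====
def Spec_odd_fibonacci_numbers (n_numbers : Int) (out : List Int) : Prop := out = odd_fibonacci_numbers_alt n_numbers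
instance (n_numbers : Int) (out : List Int) : Decidable (Spec_odd_fibonacci_numbers n_numbers out) := by unfold Spec_odd_fibonacci_numbers; infer_instance

-- ===== CLAIM (what is proved, stated in full; the proofs are below) =====
def Claim_equal_odd_fibonacci_numbers : Prop := ∀ (n_numbers : Int), Dom_odd_fibonacci_numbers n_numbers → Spec_odd_fibonacci_numbers n_numbers (odd_fibonacci_numbers n_numbers)

-- ===== LEMMAS AND PROOFS =====

lemma oddFibLoopA_stop (fuel : Nat) (n : Int) (fib odd : List Int)
    (h : ¬ ((odd.length : Int) < n)) : oddFibLoopA fuel n fib odd = odd := by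
  cases fuel <;> simp [oddFibLoopA, h]

lemma oddFibLoopB_stop (fuel : Nat) (n : Int) (a b : Int) (res : List Int)
    (h : ¬ ((res.length : Int) < n)) : oddFibLoopB fuel n a b res = res := by
  cases fuel <;> simp [oddFibLoopB, h]

lemma pyGet_last_two (pre : List Int) (x y : Int) :
    (PySem.List.pyGet? (pre ++ [x, y]) (-1)).getD 0 = y ∧
    (PySem.List.pyGet? (pre ++ [x, y]) (-2)).getD 0 = x := by
  constructor
  · rw [PySem.List.pyGet?_neg_one]
    simp [List.getLast?_append]
  · rw [show pre ++ [x, y] = (pre ++ [x]) ++ [y] by simp,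
        PySem.List.pyGet?_neg_ofNat ((pre ++ [x]) ++ [y]) 2 (by omega) (by simp)]
    simp

-- core correspondence: three iterations of A's loop = one iteration of B's loop
lemma mod2_even (x y : Int) (hx : x % 2 = 1) (hy : y % 2 = 1) :
    ¬ (PySem.Int.mod (y + x) 2 = 1) := by
  rw [PySem.Int.mod_eq_emod_of_pos (by norm_num)]; omega

lemma mod2_odd (x y : Int) (hx : x % 2 = 1) (hy : y % 2 = 0) :
    PySem.Int.mod (y + x) 2 = 1 := by
  rw [PySem.Int.mod_eq_emod_of_pos (by norm_num)]; omega

-- one unfolding of A's loop body, with the list state in 'prefix ++ last two' form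
lemma oddFibLoopA_step (fuel : Nat) (n x y : Int) (pre odd : List Int)
    (h : (odd.length : Int) < n) :
    oddFibLoopA (fuel + 1) n (pre ++ [x, y]) odd =
      oddFibLoopA fuel n ((pre ++ [x]) ++ [y, y + x])
        (if PySem.Int.mod (y + x) 2 = 1 then odd ++ [y + x] else odd) := by
  have h1 := pyGet_last_two pre x y
  simp only [oddFibLoopA, if_pos h, h1.1, h1.2]
  congr 1
  simp

-- one unfolding of B's loop body
lemma oddFibLoopB_step (fuel : Nat) (n a b : Int) (res : List Int)
    (h : (res.length : Int) < n) :
    oddFibLoopB (fuel + 1) n a b res =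
      oddFibLoopB fuel n (a + 2 * b) (2 * a + 3 * b)
        (if ((res ++ [a + 2 * b]).length : Int) < n
         then (res ++ [a + 2 * b]) ++ [2 * a + 3 * b] else res ++ [a + 2 * b]) := by
  simp only [oddFibLoopB, if_pos h]

lemma loop_eq (d : Nat) : ∀ (fA fB : Nat) (n x y : Int) (pre odd : List Int),
    x % 2 = 1 → y % 2 = 1 →
    n ≤ (odd.length : Int) + d → 3 * d ≤ fA → d ≤ fB →
    oddFibLoopA fA n (pre ++ [x, y]) odd = oddFibLoopB fB n x y odd := by
  induction d with
  | zero =>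
    intro fA fB n x y pre odd hx hy hn _ _
    rw [oddFibLoopA_stop _ _ _ _ (by omega), oddFibLoopB_stop _ _ _ _ _ (by omega)]
  | succ d ih =>
    intro fA fB n x y pre odd hx hy hn hfA hfB
    by_cases hc : (odd.length : Int) < n
    · obtain ⟨fA', rfl⟩ : ∃ k, fA = (k + 2) + 1 := ⟨fA - 3, by omega⟩
      obtain ⟨fB', rfl⟩ : ∃ k, fB = k + 1 := ⟨fB - 1, by omega⟩
      have hxy : ¬ (PySem.Int.mod (y + x) 2 = 1) := mod2_even x y hx hy
      have hyx2 : (y + x) % 2 = 0 := by omega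
      have hodd1 : PySem.Int.mod ((y + x) + y) 2 = 1 := mod2_odd y (y + x) hy hyx2
      have h1 : ((y + x) + y) % 2 = 1 := by
        rw [← PySem.Int.mod_eq_emod_of_pos (by norm_num)]; exact hodd1
      have hodd2 : PySem.Int.mod (((y + x) + y) + (y + x)) 2 = 1 := by
        have := mod2_odd ((y + x) + y) (y + x) h1 hyx2
        rwa [show (y + x) + ((y + x) + y) = ((y + x) + y) + (y + x) by ring] at this
      have h2 : (((y + x) + y) + (y + x)) % 2 = 1 := by
        rw [← PySem.Int.mod_eq_emod_of_pos (by norm_num)]; exact hodd2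
      rw [oddFibLoopA_step _ _ x y pre odd hc, if_neg hxy]
      rw [show fA' + 2 = (fA' + 1) + 1 from rfl]
      rw [oddFibLoopA_step _ _ y (y + x) (pre ++ [x]) odd hc, if_pos hodd1]
      rw [oddFibLoopB_step _ _ x y odd hc]
      by_cases hc2 : (odd.length : Int) + 1 < n
      · have hc2A : (((odd ++ [(y + x) + y]).length : Int)) < n := by
          simp; omega
        rw [oddFibLoopA_step _ _ (y + x) ((y + x) + y) ((pre ++ [x]) ++ [y])
              (odd ++ [(y + x) + y]) hc2A, if_pos hodd2]
        have hc2B : (((odd ++ [x + 2 * y]).length : Int)) < n := by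
          simp; omega
        rw [if_pos hc2B]
        rw [show (odd ++ [(y + x) + y]) ++ [((y + x) + y) + (y + x)]
              = (odd ++ [x + 2 * y]) ++ [2 * x + 3 * y] by
              simp; constructor <;> ring]
        rw [show ((((pre ++ [x]) ++ [y]) ++ [y + x]) ++ [(y + x) + y, ((y + x) + y) + (y + x)])
              = ((((pre ++ [x]) ++ [y]) ++ [y + x]) ++ [x + 2 * y, 2 * x + 3 * y]) by
              simp; constructor <;> ring]
        rw [show (odd ++ [x + 2 * y]) ++ [2 * x + 3 * y]
              = odd ++ [x + 2 * y, 2 * x + 3 * y] by simp]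
        exact ih _ _ n (x + 2 * y) (2 * x + 3 * y) _ _
          (by omega) (by omega) (by simp; omega) (by omega) (by omega)
      · have hc2A : ¬ (((odd ++ [(y + x) + y]).length : Int)) < n := by
          simp; omega
        have hc2B : ¬ (((odd ++ [x + 2 * y]).length : Int)) < n := by
          simp; omega
        rw [oddFibLoopA_stop _ _ _ _ hc2A, if_neg hc2B,
            oddFibLoopB_stop _ _ _ _ _ hc2B]
        simp [show (y + x) + y = x + 2 * y by ring]
    · rw [oddFibLoopA_stop _ _ _ _ hc, oddFibLoopB_stop _ _ _ _ _ hc]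

-- ===== VERDICT (by name: the statement is the Claim_ definition above) =====
theorem odd_fibonacci_numbers_spec : Claim_equal_odd_fibonacci_numbers := by
  intro n _
  unfold Spec_odd_fibonacci_numbers odd_fibonacci_numbers odd_fibonacci_numbers_alt
  by_cases h1 : n = 1
  · simp [h1]
  · rw [if_neg h1, if_neg h1]
    exact loop_eq n.toNat (3 * n.toNat) n.toNat n 1 1 [] [1, 1]
      (by decide) (by decide) (by simp; omega) (le_refl _) (le_refl _)
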